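-- pv_equiv track=rewrite | github.com/SOLSD/New-Power-Index | Interim Report and Program/algo_work/program_files/find_mwc.py | minimal_test
-- ===== SOURCE A (Python) =====
-- def minimal_test(combination, total, target):
--     """
--     Takes combination and checks if it is minimal
--
--     The each party's votes are removed from the total one at a time
--     and if for all parties, each time that happens the total is
--     smaller than the target, the combination is minimal.
--     """
--     count = 0
--     for i in range(len(combination)):
--         check = total - combination[i][-1]
--         if check < target:
--             count += 1
--     if count == len(combination) and total >= target:
--         return True
--     return False
-- ===== SOURCE B (Python) =====
-- def minimal_test(combination, total, target):
--     if not combination: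
--         return total >= target
--     m = min(c[-1] for c in combination)
--     return total >= target and total - m < target
-- ===== Notes on version B (the rewrite author's own statement) =====
-- stated objective: simpler
-- what changed: B replaces A's per-element counting loop (count how many removals drop below target, then compare the count to the length) with a single aggregate: the 'all removals drop below target' test holds iff it holds for the minimum last element, so B takes min(c[-1]) once and does one comparison.
import Mathlib
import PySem

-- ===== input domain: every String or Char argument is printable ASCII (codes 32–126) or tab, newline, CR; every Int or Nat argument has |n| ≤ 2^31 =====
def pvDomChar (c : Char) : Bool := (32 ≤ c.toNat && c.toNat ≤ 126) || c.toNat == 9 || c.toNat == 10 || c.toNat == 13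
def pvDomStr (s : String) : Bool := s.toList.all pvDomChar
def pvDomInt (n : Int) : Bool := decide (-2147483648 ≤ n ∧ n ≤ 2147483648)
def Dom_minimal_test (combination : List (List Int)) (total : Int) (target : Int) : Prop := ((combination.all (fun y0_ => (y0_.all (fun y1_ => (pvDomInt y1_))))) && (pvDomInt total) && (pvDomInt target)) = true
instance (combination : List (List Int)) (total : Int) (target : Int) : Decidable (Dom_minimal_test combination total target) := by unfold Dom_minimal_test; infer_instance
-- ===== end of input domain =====

-- B replaces A's counting loop with one aggregate: min of the last elements, then a single comparison (objective: simpler).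

-- ===== PORT A =====
def minimal_test (combination : List (List Int)) (total : Int) (target : Int) : Bool :=
  let count : Int :=
    (PySem.List.pyRange 0 (combination.length : Int) 1).foldl
      (fun count i =>
        let check := total - (PySem.List.pyGetD (PySem.List.pyGetD combination i []) (-1) 0)
        if check < target then count + 1 else count) 0
  if count = (combination.length : Int) ∧ total ≥ target then true else false

-- ===== PORT B =====
def minimal_test_alt (combination : List (List Int)) (total : Int) (target : Int) : Bool :=
  match combination with
  | [] => decide (total ≥ target)
  | _ :: _ =>
    let m := (PySem.List.min? (combination.map (fun c => PySem.List.pyGetD c (-1) 0)) (fun x => x)).getD 0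
    decide (total ≥ target) && decide (total - m < target)

-- ===== PRECONDITION & SPEC =====
-- Pre_ excludes exactly the inputs on which A raises IndexError: an empty inner list (combination[i][-1]).
def Pre_minimal_test (combination : List (List Int)) (total : Int) (target : Int) : Prop :=
  ∀ c ∈ combination, c ≠ []
instance (combination : List (List Int)) (total : Int) (target : Int) : Decidable (Pre_minimal_test combination total target) := by unfold Pre_minimal_test; infer_instance
def pvWitness_minimal_test : List (List Int) × Int × Int := ([[3], [2, 4]], 7, 5)
def Spec_minimal_test (combination : List (List Int)) (total : Int) (target : Int) (out : Bool) : Prop := out = minimal_test_alt combination total target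
instance (combination : List (List Int)) (total : Int) (target : Int) (out : Bool) : Decidable (Spec_minimal_test combination total target out) := by unfold Spec_minimal_test; infer_instance

-- ===== CLAIM (what is proved, stated in full; the proofs are below) =====
def Claim_equal_minimal_test : Prop := ∀ (combination : List (List Int)) (total : Int) (target : Int), Dom_minimal_test combination total target → Pre_minimal_test combination total target → Spec_minimal_test combination total target (minimal_test combination total target)

-- ===== LEMMAS AND PROOFS =====

-- A's loop over indices is the countP of the "removal drops below target" predicate over the list.
theorem minimalA_count (combination : List (List Int)) (total target : Int) :
    (PySem.List.pyRange 0 (combination.length : Int) 1).foldl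
      (fun count i =>
        if total - PySem.List.pyGetD (PySem.List.pyGetD combination i []) (-1) 0 < target
        then count + 1 else count) (0 : Int)
    = (combination.countP (fun c => total - PySem.List.pyGetD c (-1) 0 < target) : Int) := by
  rw [PySem.List.foldl_pyRange_zero_pyGetD' combination []
        (fun acc c => if total - PySem.List.pyGetD c (-1) 0 < target then acc + 1 else acc) 0]
  simpa using PySem.List.foldl_count_if
    (fun c => decide (total - PySem.List.pyGetD c (-1) 0 < target)) combination 0

theorem countP_eq_length_iff {α : Type} (l : List α) (p : α → Bool) :
    ((l.countP p : Int) = (l.length : Int)) ↔ ∀ c ∈ l, p c = true := by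
  rw [Int.ofNat_inj]
  exact List.countP_eq_length

-- the "all removals drop below target" test reduces to the minimum last element
theorem min_reduces (xs : List Int) (total target : Int) (hne : xs ≠ []) :
    (total - (PySem.List.min? xs (fun x => x)).getD 0 < target) ↔ ∀ x ∈ xs, total - x < target := by
  obtain ⟨m, hm⟩ : ∃ m, PySem.List.min? xs (fun x => x) = some m := by
    cases h : PySem.List.min? xs (fun x => x) with
    | none => exact absurd ((PySem.List.min?_eq_none_iff _ _).mp h) hne
    | some m => exact ⟨m, rfl⟩
  rw [hm]
  simp only [Option.getD_some]
  constructor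
  · intro h x hx
    have := PySem.List.min?_isMin hm x hx
    omega
  · intro h
    exact h m (PySem.List.min?_mem hm)

theorem minimal_test_spec : Claim_equal_minimal_test := by
  intro combination total target _ hpre
  unfold Spec_minimal_test minimal_test minimal_test_alt
  simp only [minimalA_count]
  cases combination with
  | nil => simp
  | cons c cs =>
    have hiff :
        ((((c :: cs).countP (fun x => total - PySem.List.pyGetD x (-1) 0 < target) : Nat) : Int)
            = (((c :: cs).length : Nat) : Int) ∧ total ≥ target)
        ↔ (total ≥ target ∧
            total - ((PySem.List.min? ((c :: cs).map (fun x => PySem.List.pyGetD x (-1) 0)) (fun x => x)).getD 0) < target) := by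
      rw [countP_eq_length_iff,
          min_reduces ((c :: cs).map (fun x => PySem.List.pyGetD x (-1) 0)) total target (by simp)]
      simp only [List.forall_mem_map, decide_eq_true_eq]
      tauto
    split_ifs with h
    · have h2 := hiff.mp h
      rw [decide_eq_true h2.1, decide_eq_true h2.2]
      rfl
    · have h2 : ¬ (total ≥ target ∧
          total - ((PySem.List.min? ((c :: cs).map (fun x => PySem.List.pyGetD x (-1) 0)) (fun x => x)).getD 0) < target) :=
        fun hc => h (hiff.mpr hc)
      rcases Decidable.not_and_iff_or_not.mp h2 with h1 | h1
      · rw [decide_eq_false h1, Bool.false_and]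
      · rw [decide_eq_false h1, Bool.and_false]
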